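-- pv_equiv track=rewrite | github.com/benchcutlogic/local-weather | services/commentary/prompt_builder.py | _data_availability_summary
-- ===== SOURCE A (Python) =====
-- def _data_availability_summary(forecasts: list[dict]) -> str:
--     """Summarize usable data coverage per model."""
--     if not forecasts:
--         return "No forecast rows available."
--
--     per_model: dict[str, dict[str, int]] = {}
--     for row in forecasts:
--         model = row.get("model_name", "UNKNOWN")
--         m = per_model.setdefault(model, {"rows": 0, "usable": 0, "surface": 0, "surface_usable": 0})
--         m["rows"] += 1
--         usable = any(
--             row.get(k) is not None
--             for k in ("temperature_2m", "precip_kg_m2", "wind_speed_10m", "snow_depth", "relative_humidity")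
--         )
--         if usable:
--             m["usable"] += 1
--         if row.get("elevation_band") is None:
--             m["surface"] += 1
--             if usable:
--                 m["surface_usable"] += 1
--
--     lines = []
--     for model, stats in sorted(per_model.items()):
--         lines.append(
--             f"- {model}: rows={stats['rows']}, usable_rows={stats['usable']}, "
--             f"surface_rows={stats['surface']}, surface_usable={stats['surface_usable']}"
--         )
--     return "\n".join(lines)
-- ===== SOURCE B (Python) =====
-- _USABLE_FIELDS = ("temperature_2m", "precip_kg_m2", "wind_speed_10m", "snow_depth", "relative_humidity")
--
--
-- def _data_availability_summary(forecasts: list[dict]) -> str: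
--     """Summarize usable data coverage per model (group-then-aggregate)."""
--     if not forecasts:
--         return "No forecast rows available."
--
--     groups: dict = {}
--     for row in forecasts:
--         groups.setdefault(row.get("model_name", "UNKNOWN"), []).append(row)
--
--     def usable(row):
--         return any(row.get(k) is not None for k in _USABLE_FIELDS)
--
--     def surface(row):
--         return row.get("elevation_band") is None
--
--     return "\n".join(
--         f"- {model}: rows={len(g)}, "
--         f"usable_rows={sum(1 for r in g if usable(r))}, "
--         f"surface_rows={sum(1 for r in g if surface(r))}, "
--         f"surface_usable={sum(1 for r in g if surface(r) and usable(r))}"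
--         for model, g in sorted(groups.items())
--     )
-- ===== Notes on version B (the rewrite author's own statement) =====
-- stated objective: alternative
-- what changed: B first partitions the rows into per-model groups in one grouping pass, then computes each model's four statistics as aggregate counts (len/countP) over its group, instead of A's single pass that increments four interleaved counters per row.
import Mathlib
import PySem

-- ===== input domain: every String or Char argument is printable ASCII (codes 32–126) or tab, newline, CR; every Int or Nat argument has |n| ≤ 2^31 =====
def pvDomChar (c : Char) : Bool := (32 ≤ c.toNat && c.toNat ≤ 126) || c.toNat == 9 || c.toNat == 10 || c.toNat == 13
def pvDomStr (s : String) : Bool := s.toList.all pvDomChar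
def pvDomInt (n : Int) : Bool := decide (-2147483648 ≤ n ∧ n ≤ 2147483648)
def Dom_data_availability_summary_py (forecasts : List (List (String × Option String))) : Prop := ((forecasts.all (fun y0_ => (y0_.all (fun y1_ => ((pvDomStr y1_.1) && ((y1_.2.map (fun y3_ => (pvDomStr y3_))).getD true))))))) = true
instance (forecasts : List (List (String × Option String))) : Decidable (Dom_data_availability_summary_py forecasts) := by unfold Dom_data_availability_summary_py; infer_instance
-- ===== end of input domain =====

-- B changes the decomposition (group rows per model, then aggregate each group) with the same cost; equivalence is about the return value only.

-- ===== PORT A =====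
-- Shared row-level semantics (both Pythons read rows the same way).
-- rowModel: Python's row.get("model_name", "UNKNOWN"); a stored None key is rendered "None",
-- which is exact inside Pre_ (mixed None/str model keys, where Python's sorted() raises, are excluded).
def rowModel (row : List (String × Option String)) : String :=
  match (PySem.Dict.mk row).get? "model_name" with
  | none => "UNKNOWN"
  | some none => "None"
  | some (some s) => s

def rowUsable (row : List (String × Option String)) : Bool :=
  ["temperature_2m", "precip_kg_m2", "wind_speed_10m", "snow_depth", "relative_humidity"].any
    (fun k =>
      match (PySem.Dict.mk row).get? k with
      | some (some _) => true
      | _ => false)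

def rowSurface (row : List (String × Option String)) : Bool :=
  match (PySem.Dict.mk row).get? "elevation_band" with
  | some (some _) => false
  | _ => true

-- A's per-row counter update: rows += 1; if usable: usable += 1; if surface: surface += 1 and if usable: surface_usable += 1
def updRow (row : List (String × Option String)) (m : Int × Int × Int × Int) : Int × Int × Int × Int :=
  (m.1 + 1,
   m.2.1 + (if rowUsable row then 1 else 0),
   m.2.2.1 + (if rowSurface row then 1 else 0),
   m.2.2.2 + (if rowSurface row && rowUsable row then 1 else 0))

def data_availability_summary_py (forecasts : List (List (String × Option String))) : String :=
  if forecasts = [] then "No forecast rows available."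
  else
    let per : PySem.Dict String (Int × Int × Int × Int) :=
      forecasts.foldl (fun d row => d.modify (rowModel row) (0, 0, 0, 0) (updRow row))
        PySem.Dict.empty
    PySem.Str.join "\n"
      ((PySem.List.sorted per.items (fun p => p.1) false).map (fun p =>
        "- " ++ p.1 ++ ": rows=" ++ PySem.Int.toStr p.2.1 ++
        ", usable_rows=" ++ PySem.Int.toStr p.2.2.1 ++
        ", surface_rows=" ++ PySem.Int.toStr p.2.2.2.1 ++
        ", surface_usable=" ++ PySem.Int.toStr p.2.2.2.2))

-- ===== PORT B =====
def data_availability_summary_py_alt (forecasts : List (List (String × Option String))) : String :=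
  if forecasts = [] then "No forecast rows available."
  else
    let groups : PySem.Dict String (List (List (String × Option String))) :=
      forecasts.foldl (fun d row => d.modify (rowModel row) [] (· ++ [row])) PySem.Dict.empty
    PySem.Str.join "\n"
      ((PySem.List.sorted groups.items (fun p => p.1) false).map (fun p =>
        "- " ++ p.1 ++ ": rows=" ++ PySem.Int.toStr (p.2.length : Int) ++
        ", usable_rows=" ++ PySem.Int.toStr ((p.2.countP rowUsable : Nat) : Int) ++
        ", surface_rows=" ++ PySem.Int.toStr ((p.2.countP rowSurface : Nat) : Int) ++
        ", surface_usable=" ++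
          PySem.Int.toStr ((p.2.countP (fun r => rowSurface r && rowUsable r) : Nat) : Int)))

-- ===== PRECONDITION & SPEC =====
-- Pre_ excludes exactly the inputs on which Python A raises TypeError: model_name keys mixing a
-- stored None with any other model (sorted() then compares None with str). B raises there too.
def Pre_data_availability_summary_py (forecasts : List (List (String × Option String))) : Prop :=
  (∀ row ∈ forecasts, (PySem.Dict.mk row).get? "model_name" ≠ some none) ∨
  (∀ row ∈ forecasts, (PySem.Dict.mk row).get? "model_name" = some none)

instance (forecasts : List (List (String × Option String))) : Decidable (Pre_data_availability_summary_py forecasts) := by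
  unfold Pre_data_availability_summary_py; infer_instance

def pvWitness_data_availability_summary_py : (List (List (String × Option String))) :=
  [[("model_name", some "gfs"), ("temperature_2m", some "1.5")], [("elevation_band", none)]]

def Spec_data_availability_summary_py (forecasts : List (List (String × Option String))) (out : String) : Prop := out = data_availability_summary_py_alt forecasts
instance (forecasts : List (List (String × Option String))) (out : String) : Decidable (Spec_data_availability_summary_py forecasts out) := by unfold Spec_data_availability_summary_py; infer_instance

-- ===== CLAIM (what is proved, stated in full; the proofs are below) =====
def Claim_equal_data_availability_summary_py : Prop := ∀ (forecasts : List (List (String × Option String))), Dom_data_availability_summary_py forecasts → Pre_data_availability_summary_py forecasts → Spec_data_availability_summary_py forecasts (data_availability_summary_py forecasts)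

-- ===== LEMMAS AND PROOFS =====

-- A's counter fold, projected at one key, is the update fold over that key's rows.
theorem foldA_getD (l : List (List (String × Option String)))
    (d : PySem.Dict String (Int × Int × Int × Int)) (k : String) :
    (l.foldl (fun d row => d.modify (rowModel row) (0, 0, 0, 0) (updRow row)) d).getD k (0, 0, 0, 0)
      = (l.filter (fun r => rowModel r == k)).foldl (fun s r => updRow r s) (d.getD k (0, 0, 0, 0)) := by
  induction l generalizing d with
  | nil => rfl
  | cons r t ih =>
    simp only [List.foldl_cons, List.filter_cons, ih, PySem.Dict.getD_modify]
    by_cases h : rowModel r = k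
    · simp [h]
    · simp [h, Ne.symm h]

-- B's grouping fold, projected at one key, is the filter of that key's rows.
theorem foldB_getD (l : List (List (String × Option String)))
    (d : PySem.Dict String (List (List (String × Option String)))) (k : String) :
    (l.foldl (fun d row => d.modify (rowModel row) [] (· ++ [row])) d).getD k []
      = d.getD k [] ++ l.filter (fun r => rowModel r == k) := by
  induction l generalizing d with
  | nil => simp
  | cons r t ih =>
    simp only [List.foldl_cons, List.filter_cons, ih, PySem.Dict.getD_modify]
    by_cases h : rowModel r = k
    · simp [h]
    · simp [h, Ne.symm h]

-- Folding A's update over a group computes the group's aggregate counts.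
theorem foldUpd (g : List (List (String × Option String))) (s : Int × Int × Int × Int) :
    g.foldl (fun s r => updRow r s) s
      = (s.1 + g.length, s.2.1 + g.countP rowUsable, s.2.2.1 + g.countP rowSurface,
         s.2.2.2 + g.countP (fun r => rowSurface r && rowUsable r)) := by
  induction g generalizing s with
  | nil => simp
  | cons r t ih =>
    rw [List.foldl_cons, ih]
    simp only [updRow, List.countP_cons, List.length_cons]
    obtain ⟨a, b, c, e⟩ := s
    refine Prod.ext ?_ (Prod.ext ?_ (Prod.ext ?_ ?_)) <;>
      simp only [] <;> (push_cast; (try split_ifs) <;> omega)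

-- A dict with nodup keys is its key list paired with its lookups.
theorem items_eq_keys_map {ν : Type} (d0 : ν) (es : List (String × ν))
    (h : (es.map Prod.fst).Nodup) :
    es = (es.map Prod.fst).map (fun k => (k, (PySem.Dict.mk es).getD k d0)) := by
  induction es with
  | nil => rfl
  | cons p t ih =>
    obtain ⟨k, v⟩ := p
    simp only [List.map_cons, List.nodup_cons, List.mem_map] at h
    simp only [List.map_cons, List.cons.injEq]
    refine ⟨?_, ?_⟩
    · simp [PySem.Dict.getD, PySem.Dict.get?_mk_cons]
    · have ht := ih h.2
      conv_lhs => rw [ht]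
      apply List.map_congr_left
      intro x hx
      obtain ⟨a, ha, hax⟩ := List.mem_map.mp hx
      have hxk : ¬ (k == x) = true := by
        simp only [beq_iff_eq]
        intro he; subst he
        exact h.1 ⟨a, ha, hax⟩
      simp [PySem.Dict.getD, PySem.Dict.get?_mk_cons, hxk]

-- Sorting a nodup-keyed dict's items by key is sorting the keys and looking each up.
theorem sorted_items_eq {ν : Type} (d : PySem.Dict String ν) (d0 : ν) (h : d.keys.Nodup) :
    PySem.List.sorted d.items (fun p => p.1) false
      = (PySem.List.sorted d.keys (fun k => k) false).map (fun k => (k, d.getD k d0)) := by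
  apply PySem.List.sorted_eq_of_perm_of_pairwise_lt
  · have hperm : (PySem.List.sorted d.keys (fun k => k) false).Perm d.keys :=
      PySem.List.sorted_perm _ _ _
    have hitems : d.items = d.keys.map (fun k => (k, d.getD k d0)) := by
      obtain ⟨es⟩ := d
      exact items_eq_keys_map d0 es h
    rw [hitems]
    exact hperm.map _
  · have hle : (PySem.List.sorted d.keys (fun k => k) false).Pairwise (fun a b => a ≤ b) :=
      PySem.List.sorted_pairwise _ _
    have hperm2 := PySem.List.sorted_perm d.keys (fun k => k) false
    have hnd : (PySem.List.sorted d.keys (fun k => k) false).Nodup := hperm2.nodup_iff.mpr h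
    have hlt : (PySem.List.sorted d.keys (fun k => k) false).Pairwise (fun a b => a < b) :=
      (hle.and hnd).imp (fun hp => lt_of_le_of_ne hp.1 hp.2)
    exact hlt.map _ (by intro a b hab; simpa using hab)

-- ===== VERDICT (by name: the statement is the Claim_ definition above) =====
theorem data_availability_summary_py_spec : Claim_equal_data_availability_summary_py := by
  intro forecasts _ _
  unfold Spec_data_availability_summary_py
  unfold data_availability_summary_py data_availability_summary_py_alt
  by_cases hnil : forecasts = []
  · simp [hnil]
  · simp only [if_neg hnil]
    -- keys of the two folded dicts coincide and are nodup
    have hkA := PySem.Dict.keys_foldl_modify_key forecasts rowModel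
      ((0, 0, 0, 0) : Int × Int × Int × Int) (fun _ row => updRow row) PySem.Dict.empty
    have hkB := PySem.Dict.keys_foldl_modify_key forecasts rowModel
      ([] : List (List (String × Option String))) (fun _ row => (· ++ [row])) PySem.Dict.empty
    have hndA := PySem.Dict.nodup_keys_foldl_modify_key forecasts rowModel
      ((0, 0, 0, 0) : Int × Int × Int × Int) (fun _ row => updRow row) PySem.Dict.empty
      (by simp [PySem.Dict.keys, PySem.Dict.empty])
    have hndB := PySem.Dict.nodup_keys_foldl_modify_key forecasts rowModel
      ([] : List (List (String × Option String))) (fun _ row => (· ++ [row])) PySem.Dict.empty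
      (by simp [PySem.Dict.keys, PySem.Dict.empty])
    rw [sorted_items_eq _ ((0, 0, 0, 0) : Int × Int × Int × Int) hndA,
        sorted_items_eq _ ([] : List (List (String × Option String))) hndB]
    rw [hkA, hkB]
    rw [List.map_map, List.map_map]
    congr 1
    apply List.map_congr_left
    intro k _
    simp only [Function.comp]
    rw [foldA_getD, foldB_getD, foldUpd]
    simp [PySem.Dict.getD, PySem.Dict.empty, PySem.Dict.get?]
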